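-- pv_equiv track=rewrite | github.com/ShiwanthaH/MiddleOverStrikeRateOptimizer | Dataset/fetch_espncricinfo_styles.py | extract_styles_from_text
-- ===== SOURCE A (Python) =====
-- def extract_styles_from_text(text):
--     """Extract styles from plain text (rendered page)."""
--     batting_style = 'N/A'
--     bowling_style = 'N/A'
--     lines = text.split('\n')
--     for i, line in enumerate(lines):
--         stripped = line.strip()
--         if stripped.upper() == 'BATTING STYLE' and i + 1 < len(lines):
--             batting_style = lines[i + 1].strip()
--         if stripped.upper() == 'BOWLING STYLE' and i + 1 < len(lines):
--             bowling_style = lines[i + 1].strip()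
--     return batting_style[:80], bowling_style[:80]
-- ===== SOURCE B (Python) =====
-- def extract_styles_from_text(text):
--     """Extract styles from plain text (rendered page)."""
--     lines = text.split('\n')
--
--     def last_value(label):
--         # scan backwards; the first hit from the end is A's last-wins value
--         for i in range(len(lines) - 2, -1, -1):
--             if lines[i].strip().upper() == label:
--                 return lines[i + 1].strip()[:80]
--         return 'N/A'
--
--     return last_value('BATTING STYLE'), last_value('BOWLING STYLE')
-- ===== Notes on version B (the rewrite author's own statement) =====
-- stated objective: alternative
-- what changed: Replaces A's single forward pass that accumulates both styles with two independent backward searches (per label) that early-return at the first match from the end, which is A's last-wins value.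
import Mathlib
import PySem

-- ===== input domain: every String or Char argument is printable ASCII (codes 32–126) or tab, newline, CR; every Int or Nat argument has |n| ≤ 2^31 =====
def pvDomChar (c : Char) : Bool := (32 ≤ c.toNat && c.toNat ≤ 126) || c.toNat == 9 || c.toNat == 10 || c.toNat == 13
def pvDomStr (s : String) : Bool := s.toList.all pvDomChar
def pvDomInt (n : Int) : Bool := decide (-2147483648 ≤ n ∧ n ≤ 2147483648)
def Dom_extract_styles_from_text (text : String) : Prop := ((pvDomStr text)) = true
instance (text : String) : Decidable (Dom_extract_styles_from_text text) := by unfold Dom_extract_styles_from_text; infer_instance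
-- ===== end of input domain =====

-- B replaces A's single forward accumulating pass by two independent backward searches,
-- one per label, each returning at the first match from the end (objective: alternative
-- decomposition, same O(n) cost).

-- ===== PORT A =====
-- A's loop body: two sequential guarded reassignments of the (batting, bowling) state.
def pvStepA (lines : List String) (st : String × String) (p : Int × String) : String × String :=
  let stripped := PySem.Str.strip p.2
  let st1 := if PySem.Str.upper stripped = "BATTING STYLE" ∧ p.1 + 1 < PySem.List.len lines
             then (PySem.Str.strip (PySem.List.pyGetD lines (p.1 + 1) ""), st.2) else st
  if PySem.Str.upper stripped = "BOWLING STYLE" ∧ p.1 + 1 < PySem.List.len lines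
  then (st1.1, PySem.Str.strip (PySem.List.pyGetD lines (p.1 + 1) "")) else st1

def extract_styles_from_text (text : String) : String × String :=
  let lines := (PySem.Str.split? text "\n").getD []  -- sep "\n" ≠ "": split? is always some
  let st := (PySem.List.enumerate lines).foldl (pvStepA lines) ("N/A", "N/A")
  (PySem.Str.slice st.1 none (some 80), PySem.Str.slice st.2 none (some 80))

-- ===== PORT B =====
-- B's `for i in range(len(lines)-2, -1, -1)` with early return, transcribed as structural
-- recursion on the index: called with k = len(lines)-1, the branch `k+1 := succ k` inspects
-- index k, counting down.  lines.getD is exact here: every inspected index is in range.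
def pvLastValue (lines : List String) (label : String) : Nat → String
  | 0 => "N/A"
  | k + 1 =>
      if PySem.Str.upper (PySem.Str.strip (lines.getD k "")) = label
      then PySem.Str.slice (PySem.Str.strip (lines.getD (k + 1) "")) none (some 80)
      else pvLastValue lines label k

def extract_styles_from_text_alt (text : String) : String × String :=
  let lines := (PySem.Str.split? text "\n").getD []  -- sep "\n" ≠ "": split? is always some
  (pvLastValue lines "BATTING STYLE" (lines.length - 1),
   pvLastValue lines "BOWLING STYLE" (lines.length - 1))

-- ===== PRECONDITION & SPEC =====
def Spec_extract_styles_from_text (text : String) (out : String × String) : Prop := out = extract_styles_from_text_alt text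
instance (text : String) (out : String × String) : Decidable (Spec_extract_styles_from_text text out) := by unfold Spec_extract_styles_from_text; infer_instance

-- ===== CLAIM (what is proved, stated in full; the proofs are below) =====
def Claim_equal_extract_styles_from_text : Prop := ∀ (text : String), Dom_extract_styles_from_text text → Spec_extract_styles_from_text text (extract_styles_from_text text)

-- ===== LEMMAS AND PROOFS =====

-- the successor-pair step, componentwise form of A's body
def pvStepZ (st : String × String) (p : String × String) : String × String :=
  (if PySem.Str.upper (PySem.Str.strip p.1) = "BATTING STYLE" then PySem.Str.strip p.2 else st.1,
   if PySem.Str.upper (PySem.Str.strip p.1) = "BOWLING STYLE" then PySem.Str.strip p.2 else st.2)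

-- A's enumerate-indexed fold over a suffix of `lines` equals the fold over successor pairs
theorem pv_enum_to_zip (lines : List String) :
    ∀ (suf : List String) (j : Nat), suf = lines.drop j → ∀ (init : String × String),
    (PySem.List.enumerate suf (j : Int)).foldl (pvStepA lines) init
      = (suf.zip suf.tail).foldl pvStepZ init := by
  intro suf
  induction suf with
  | nil => intro j _ init; simp [PySem.List.enumerate]
  | cons x xs ih =>
    intro j hj init
    have hlen : (lines.drop j).length = lines.length - j := List.length_drop
    have hj' : xs = lines.drop (j + 1) := by
      have := congrArg List.tail hj
      simpa [List.tail_drop] using this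
    cases xs with
    | nil =>
      have hjlen : j + 1 = lines.length := by
        rw [← hj] at hlen; simp at hlen; omega
      have hng : ¬ ((j : Int) + 1 < (lines.length : Int)) := by omega
      have henum : PySem.List.enumerate [x] (j : Int) = [((j : Int), x)] := rfl
      rw [henum]
      simp [pvStepA, PySem.List.len_eq, hng]
    | cons y ys =>
      have hjlt : j + 1 < lines.length := by
        rw [← hj] at hlen; simp at hlen; omega
      have hy : PySem.List.pyGetD lines ((j : Int) + 1) "" = y := by
        have h1 : ((j : Int) + 1) = ((j + 1 : Nat) : Int) := by push_cast; ring
        rw [h1, PySem.List.pyGetD_natCast]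
        have : lines[j + 1]? = some y := by
          have := List.getElem?_drop (xs := lines) (i := j + 1) (j := 0)
          rw [← hj'] at this
          simpa using this.symm
        simp [List.getD, this]
      have hguard : ((j : Int) + 1 < PySem.List.len lines) := by
        simp [PySem.List.len_eq]; omega
      have hstep : pvStepA lines init ((j : Int), x) = pvStepZ init (x, y) := by
        simp only [pvStepA, pvStepZ, hguard, and_true, hy]
        by_cases h1 : PySem.Str.upper (PySem.Str.strip x) = "BATTING STYLE" <;>
        by_cases h2 : PySem.Str.upper (PySem.Str.strip x) = "BOWLING STYLE" <;>
          simp [h1, h2]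
      have henum : PySem.List.enumerate (x :: y :: ys) (j : Int)
          = ((j : Int), x) :: PySem.List.enumerate (y :: ys) ((j : Int) + 1) := rfl
      have hcast : ((j : Int) + 1) = ((j + 1 : Nat) : Int) := by push_cast; ring
      rw [henum, List.foldl_cons, hstep, hcast, ih (j + 1) hj']
      simp

-- A's successor-pair fold splits into two independent scalar folds
theorem pv_split :
    ∀ (l : List (String × String)) (a b : String),
    l.foldl pvStepZ (a, b)
      = (l.foldl (fun acc p => if PySem.Str.upper (PySem.Str.strip p.1) = "BATTING STYLE"
                               then PySem.Str.strip p.2 else acc) a,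
         l.foldl (fun acc p => if PySem.Str.upper (PySem.Str.strip p.1) = "BOWLING STYLE"
                               then PySem.Str.strip p.2 else acc) b) := by
  intro l
  induction l with
  | nil => intro a b; rfl
  | cons p t ih =>
    intro a b
    simp only [List.foldl_cons, pvStepZ, ih]

-- the last-wins forward fold over the first k successor pairs, sliced, is B's backward search
theorem pv_fold_to_search (lines : List String) (label : String) :
    ∀ k, k ≤ (lines.zip lines.tail).length →
    PySem.Str.slice (((lines.zip lines.tail).take k).foldl
        (fun acc p => if PySem.Str.upper (PySem.Str.strip p.1) = label
                      then PySem.Str.strip p.2 else acc) "N/A") none (some 80)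
      = pvLastValue lines label k := by
  intro k
  induction k with
  | zero => intro _; simp [pvLastValue]; decide
  | succ k ih =>
    intro hk
    have hk' : k < (lines.zip lines.tail).length := by omega
    have hkl : k < lines.length := by
      simp [List.length_zip] at hk'; omega
    have hkl1 : k + 1 < lines.length := by
      simp [List.length_zip, List.length_tail] at hk'; omega
    have hget : (lines.zip lines.tail)[k] = (lines[k], lines[k + 1]) := by
      simp [List.getElem_zip, List.getElem_tail]
    rw [List.take_add_one, List.foldl_append]
    have : (lines.zip lines.tail)[k]?.toList = [(lines[k], lines[k + 1])] := by
      simp [List.getElem?_eq_getElem hk', hget]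
    rw [this]
    simp only [List.foldl_cons, List.foldl_nil]
    rw [pvLastValue]
    rw [List.getD_eq_getElem lines "" hkl, List.getD_eq_getElem lines "" hkl1]
    by_cases h : PySem.Str.upper (PySem.Str.strip lines[k]) = label
    · simp [h]
    · simp [h, ih (by omega)]

-- ===== VERDICT (by name: the statement is the Claim_ definition above) =====
theorem extract_styles_from_text_spec : Claim_equal_extract_styles_from_text := by
  intro text _
  unfold Spec_extract_styles_from_text extract_styles_from_text extract_styles_from_text_alt
  dsimp only
  set lines := (PySem.Str.split? text "\n").getD [] with hlines
  rw [show ((0 : Int)) = ((0 : Nat) : Int) from rfl]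
  rw [pv_enum_to_zip lines lines 0 (by simp), pv_split]
  have hplen : (lines.zip lines.tail).length = lines.length - 1 := by
    simp [List.length_zip, List.length_tail]
  have htake : (lines.zip lines.tail).take (lines.length - 1) = lines.zip lines.tail := by
    rw [← hplen]; exact List.take_length
  have h1 := pv_fold_to_search lines "BATTING STYLE" (lines.length - 1) (by omega)
  have h2 := pv_fold_to_search lines "BOWLING STYLE" (lines.length - 1) (by omega)
  rw [htake] at h1 h2
  simp [h1, h2]
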